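-- pv_equiv track=rewrite | github.com/HadyTinawi/Invoice-Expense-Auditor | smart-invoice-auditor/src/agent/openai_agents/agent.py | _extract_issues_from_response
-- ===== SOURCE A (Python) =====
-- from typing import Dict, Any, List, Optional, Union
--
-- def _extract_issues_from_response(response: str, invoice_data: Dict[str, Any]) -> List[Dict[str, Any]]:
--     """
--     Extract issues from the agent response
--
--     Args:
--         response: The agent response text
--         invoice_data: The original invoice data
--
--     Returns:
--         List of issues extracted from the response
--     """
--     issues = []
--
--     # Simple parsing logic - look for patterns that indicate issues
--     # This could be enhanced with more sophisticated parsing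
--     lines = response.split("\n")
--     current_issue = None
--
--     for line in lines:
--         line = line.strip()
--
--         # Look for issue markers
--         if "Issue:" in line or "Problem:" in line or "Error:" in line:
--             if current_issue:
--                 issues.append(current_issue)
--
--             # Start a new issue
--             current_issue = {
--                 "type": "Generic Issue",
--                 "description": line.split(":", 1)[1].strip(),
--                 "severity": "medium"
--             }
--
--         # Look for severity indicators
--         elif current_issue and ("Severity:" in line or "Priority:" in line):
--             severity_text = line.split(":", 1)[1].strip().lower()
--             if "high" in severity_text:
--                 current_issue["severity"] = "high"
--             elif "low" in severity_text:
--                 current_issue["severity"] = "low"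
--             else:
--                 current_issue["severity"] = "medium"
--
--         # Look for issue types
--         elif current_issue and ("Type:" in line):
--             current_issue["type"] = line.split(":", 1)[1].strip()
--
--         # Add additional description if seems to be continuing the issue
--         elif current_issue and line and not line.startswith(("#", "-", "*")) and ":" not in line:
--             current_issue["description"] += " " + line
--
--     # Add the last issue if exists
--     if current_issue:
--         issues.append(current_issue)
--
--     # If we couldn't parse issues but there's text, create a generic issue
--     if not issues and response.strip():
--         issues.append({
--             "type": "Analysis Result",
--             "description": response.strip(),
--             "severity": "medium"
--         })
--
--     return issues
-- ===== SOURCE B (Python) =====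
-- def _extract_issues_from_response(response, invoice_data):
--     def is_marker(l):
--         return "Issue:" in l or "Problem:" in l or "Error:" in l
--
--     lines = [l.strip() for l in response.split("\n")]
--
--     # Phase 1: index-based split into blocks, each headed by a marker line;
--     # lines before the first marker are discarded.
--     n = len(lines)
--     i = 0
--     while i < n and not is_marker(lines[i]):
--         i += 1
--     blocks = []
--     while i < n:
--         j = i + 1
--         while j < n and not is_marker(lines[j]):
--             j += 1
--         blocks.append((lines[i], lines[i + 1:j]))
--         i = j
--
--     # Phase 2: build one issue per block from a (type, description, severity) triple.
--     def build(header, rest):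
--         t = "Generic Issue"
--         d = header.split(":", 1)[1].strip()
--         s = "medium"
--         for l in rest:
--             if "Severity:" in l or "Priority:" in l:
--                 sev = l.split(":", 1)[1].strip().lower()
--                 s = "high" if "high" in sev else ("low" if "low" in sev else "medium")
--             elif "Type:" in l:
--                 t = l.split(":", 1)[1].strip()
--             elif l and not l.startswith(("#", "-", "*")) and ":" not in l:
--                 d += " " + l
--         return {"type": t, "description": d, "severity": s}
--
--     issues = [build(h, rest) for h, rest in blocks]
--     if not issues and response.strip():
--         issues = [{"type": "Analysis Result", "description": response.strip(), "severity": "medium"}]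
--     return issues
-- ===== Notes on version B (the rewrite author's own statement) =====
-- stated objective: alternative
-- what changed: Replaces A's single pass with an optional mutable current-issue dict by a two-phase decomposition: an index scan first splits the stripped lines into marker-headed blocks (discarding lines before the first marker), then each block is folded independently into a (type, description, severity) triple, with the same empty-result fallback.
import Mathlib
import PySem

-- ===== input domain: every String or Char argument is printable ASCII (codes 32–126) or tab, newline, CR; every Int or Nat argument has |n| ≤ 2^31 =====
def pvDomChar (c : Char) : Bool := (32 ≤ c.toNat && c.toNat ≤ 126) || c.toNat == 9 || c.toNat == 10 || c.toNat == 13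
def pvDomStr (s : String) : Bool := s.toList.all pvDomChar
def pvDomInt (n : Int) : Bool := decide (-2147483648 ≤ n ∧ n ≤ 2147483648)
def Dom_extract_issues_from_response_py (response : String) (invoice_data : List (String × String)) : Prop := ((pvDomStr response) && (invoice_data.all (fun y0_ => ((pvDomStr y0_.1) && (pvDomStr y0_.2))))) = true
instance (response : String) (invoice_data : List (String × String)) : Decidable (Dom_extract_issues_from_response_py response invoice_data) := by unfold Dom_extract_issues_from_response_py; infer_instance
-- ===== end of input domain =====

-- B re-implements A's one-pass optional-accumulator parser as a two-phase block split
-- (index scan to markers, then a per-block (type, description, severity) triple fold);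
-- objective: alternative decomposition, same cost. Return-value equivalence only (no mutation in either).

-- shared primitive: line.split(":", 1)[1]  (only applied to lines that contain ':',
-- where splitMax? returns some two-element list; the catch-all is unreachable there)
def pvAfterColon (line : String) : String :=
  match PySem.Str.splitMax? line ":" 1 with
  | some (_ :: t :: _) => t
  | _ => ""

-- ===== PORT A =====
-- loop body on an already-stripped line (Python does `line = line.strip()` first; the
-- port composes this core with strip, see extract_issues_from_response_py)
def pvAStep (st : List (PySem.Dict String String) × Option (PySem.Dict String String))
    (line : String) : List (PySem.Dict String String) × Option (PySem.Dict String String) :=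
  if PySem.Str.isIn "Issue:" line || PySem.Str.isIn "Problem:" line || PySem.Str.isIn "Error:" line then
    let issues := match st.2 with
      | some ci => st.1 ++ [ci]
      | none => st.1
    (issues, some (PySem.Dict.mk [("type", "Generic Issue"),
        ("description", PySem.Str.strip (pvAfterColon line)), ("severity", "medium")]))
  else
    match st.2 with
    | none => st
    | some ci =>
      if PySem.Str.isIn "Severity:" line || PySem.Str.isIn "Priority:" line then
        let severity_text := PySem.Str.lower (PySem.Str.strip (pvAfterColon line))
        let v := if PySem.Str.isIn "high" severity_text then "high"
                 else if PySem.Str.isIn "low" severity_text then "low"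
                 else "medium"
        (st.1, some (ci.insert "severity" v))
      else if PySem.Str.isIn "Type:" line then
        (st.1, some (ci.insert "type" (PySem.Str.strip (pvAfterColon line))))
      else if !(line == "") &&
              !(PySem.Str.startswith line "#" || PySem.Str.startswith line "-" || PySem.Str.startswith line "*") &&
              !(PySem.Str.isIn ":" line) then
        (st.1, some (ci.insert "description" (ci.getD "description" "" ++ (" " ++ line))))
      else st

-- `if current_issue: issues.append(current_issue)` after the loop
def pvFinish (st : List (PySem.Dict String String) × Option (PySem.Dict String String)) :
    List (PySem.Dict String String) :=
  match st.2 with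
  | some ci => st.1 ++ [ci]
  | none => st.1

def extract_issues_from_response_py (response : String) (invoice_data : List (String × String)) :
    List (List (String × String)) :=
  -- response.split("\n"): split? is some for the nonempty separator "\n"
  let lines := (PySem.Str.split? response "\n").getD []
  let st := lines.foldl (fun st line => pvAStep st (PySem.Str.strip line)) ([], none)
  let issues := pvFinish st
  let issues := if issues.isEmpty && !(PySem.Str.strip response == "") then
      issues ++ [PySem.Dict.mk [("type", "Analysis Result"),
        ("description", PySem.Str.strip response), ("severity", "medium")]]
    else issues
  issues.map PySem.Dict.items

-- ===== PORT B =====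
def pvIsMarker (l : String) : Bool :=
  PySem.Str.isIn "Issue:" l || PySem.Str.isIn "Problem:" l || PySem.Str.isIn "Error:" l

-- phase 1: scan forward to each marker; the inner index scans of Source B are the
-- takeWhile (lines[i+1:j]) and dropWhile (advancing i to the next marker)
def pvSplitBlocks : List String → List (String × List String)
  | [] => []
  | l :: rest =>
    if pvIsMarker l then
      (l, rest.takeWhile (fun x => !pvIsMarker x)) ::
        pvSplitBlocks (rest.dropWhile (fun x => !pvIsMarker x))
    else
      pvSplitBlocks rest
termination_by ls => ls.length
decreasing_by
  · exact Nat.lt_succ_of_le (List.length_dropWhile_le _ _)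
  · exact Nat.lt_succ_of_le (Nat.le_refl _)

-- phase 2: per-block triple fold
def pvInnerStep (acc : String × String × String) (l : String) : String × String × String :=
  if PySem.Str.isIn "Severity:" l || PySem.Str.isIn "Priority:" l then
    let sev := PySem.Str.lower (PySem.Str.strip (pvAfterColon l))
    (acc.1, acc.2.1,
      if PySem.Str.isIn "high" sev then "high"
      else if PySem.Str.isIn "low" sev then "low" else "medium")
  else if PySem.Str.isIn "Type:" l then
    (PySem.Str.strip (pvAfterColon l), acc.2.1, acc.2.2)
  else if !(l == "") &&
          !(PySem.Str.startswith l "#" || PySem.Str.startswith l "-" || PySem.Str.startswith l "*") &&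
          !(PySem.Str.isIn ":" l) then
    (acc.1, acc.2.1 ++ (" " ++ l), acc.2.2)
  else acc

def pvBuild (b : String × List String) : List (String × String) :=
  let r := b.2.foldl pvInnerStep ("Generic Issue", PySem.Str.strip (pvAfterColon b.1), "medium")
  [("type", r.1), ("description", r.2.1), ("severity", r.2.2)]

def extract_issues_from_response_py_alt (response : String) (invoice_data : List (String × String)) :
    List (List (String × String)) :=
  let lines := ((PySem.Str.split? response "\n").getD []).map PySem.Str.strip
  let issues := (pvSplitBlocks lines).map pvBuild
  if issues.isEmpty && !(PySem.Str.strip response == "") then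
    [[("type", "Analysis Result"), ("description", PySem.Str.strip response), ("severity", "medium")]]
  else issues

-- ===== PRECONDITION & SPEC =====
def Spec_extract_issues_from_response_py (response : String) (invoice_data : List (String × String)) (out : List (List (String × String))) : Prop := out = extract_issues_from_response_py_alt response invoice_data
instance (response : String) (invoice_data : List (String × String)) (out : List (List (String × String))) : Decidable (Spec_extract_issues_from_response_py response invoice_data out) := by unfold Spec_extract_issues_from_response_py; infer_instance

-- ===== CLAIM (what is proved, stated in full; the proofs are below) =====
def Claim_equal_extract_issues_from_response_py : Prop := ∀ (response : String) (invoice_data : List (String × String)), Dom_extract_issues_from_response_py response invoice_data → Spec_extract_issues_from_response_py response invoice_data (extract_issues_from_response_py response invoice_data)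

-- ===== LEMMAS AND PROOFS =====

def pvMkD (t d s : String) : PySem.Dict String String :=
  PySem.Dict.mk [("type", t), ("description", d), ("severity", s)]

def pvTriple (r : String × String × String) : List (String × String) :=
  [("type", r.1), ("description", r.2.1), ("severity", r.2.2)]

-- one non-marker line: A's dict update is B's triple update
theorem pvAStep_nonmarker (iss : List (PySem.Dict String String)) (t d s l : String)
    (h : pvIsMarker l = false) :
    pvAStep (iss, some (pvMkD t d s)) l = (iss, some (pvMkD (pvInnerStep (t, d, s) l).1
      (pvInnerStep (t, d, s) l).2.1 (pvInnerStep (t, d, s) l).2.2)) := by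
  unfold pvIsMarker at h
  simp only [pvAStep, pvInnerStep, pvMkD, h, Bool.false_eq_true, if_false]
  split_ifs <;> rfl

theorem pvAStep_marker (iss : List (PySem.Dict String String))
    (cur : Option (PySem.Dict String String)) (l : String) (h : pvIsMarker l = true) :
    pvAStep (iss, cur) l = (pvFinish (iss, cur),
      some (pvMkD "Generic Issue" (PySem.Str.strip (pvAfterColon l)) "medium")) := by
  unfold pvIsMarker at h
  simp only [pvAStep, pvFinish, pvMkD, h, if_true]

theorem pvAStep_none (iss : List (PySem.Dict String String)) (l : String)
    (h : pvIsMarker l = false) : pvAStep (iss, none) l = (iss, none) := by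
  unfold pvIsMarker at h
  simp only [pvAStep, h, Bool.false_eq_true, if_false]

-- while a current issue exists: A's tail run = finish this block, then the remaining blocks
theorem pvRunSome (ms : List String) : ∀ (iss : List (PySem.Dict String String)) (t d s : String),
    (pvFinish (ms.foldl pvAStep (iss, some (pvMkD t d s)))).map PySem.Dict.items
      = iss.map PySem.Dict.items
        ++ pvTriple ((ms.takeWhile (fun x => !pvIsMarker x)).foldl pvInnerStep (t, d, s))
          :: (pvSplitBlocks (ms.dropWhile (fun x => !pvIsMarker x))).map pvBuild := by
  induction ms with
  | nil => intro iss t d s; simp [pvFinish, pvTriple, pvMkD, pvSplitBlocks]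
  | cons l ms ih =>
    intro iss t d s
    by_cases h : pvIsMarker l = true
    · rw [List.foldl_cons, pvAStep_marker _ _ _ h,
        List.takeWhile_cons_of_neg (by simp [h]), List.dropWhile_cons_of_neg (by simp [h]),
        pvSplitBlocks, if_pos h, List.foldl_nil, ih]
      show (pvFinish (iss, some (pvMkD t d s))).map PySem.Dict.items ++ _ = _
      simp only [pvFinish, pvBuild, pvTriple, pvMkD, List.map_append, List.map_cons,
        List.map_nil, List.append_assoc, List.cons_append, List.nil_append]
    · rw [Bool.not_eq_true] at h
      rw [List.foldl_cons, pvAStep_nonmarker _ _ _ _ _ h, ih,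
        List.takeWhile_cons_of_pos (by simp [h]), List.dropWhile_cons_of_pos (by simp [h]),
        List.foldl_cons]

-- before the first marker: A's run = the blocks of the remaining lines
theorem pvRunNone (ms : List String) : ∀ (iss : List (PySem.Dict String String)),
    (pvFinish (ms.foldl pvAStep (iss, none))).map PySem.Dict.items
      = iss.map PySem.Dict.items ++ (pvSplitBlocks ms).map pvBuild := by
  induction ms with
  | nil => intro iss; simp [pvFinish, pvSplitBlocks]
  | cons l ms ih =>
    intro iss
    by_cases h : pvIsMarker l = true
    · rw [List.foldl_cons, pvAStep_marker _ _ _ h, pvSplitBlocks, if_pos h, pvRunSome]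
      show (pvFinish (iss, none)).map PySem.Dict.items ++ _ = _
      simp only [pvFinish, pvBuild, pvTriple, List.map_cons]
    · rw [Bool.not_eq_true] at h
      rw [List.foldl_cons, pvAStep_none _ _ h, ih, pvSplitBlocks, if_neg (by simp [h])]

-- the assembled bodies of the two ports (zeta-expanded) are equal
theorem pvFinal (resp : String) (ls : List String) :
    List.map PySem.Dict.items
      (if ((pvFinish (ls.foldl (fun st line => pvAStep st (PySem.Str.strip line)) ([], none))).isEmpty
            && !(PySem.Str.strip resp == "")) = true then
        pvFinish (ls.foldl (fun st line => pvAStep st (PySem.Str.strip line)) ([], none))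
          ++ [PySem.Dict.mk [("type", "Analysis Result"),
                ("description", PySem.Str.strip resp), ("severity", "medium")]]
      else pvFinish (ls.foldl (fun st line => pvAStep st (PySem.Str.strip line)) ([], none)))
    = (if (((pvSplitBlocks (ls.map PySem.Str.strip)).map pvBuild).isEmpty
            && !(PySem.Str.strip resp == "")) = true then
        [[("type", "Analysis Result"), ("description", PySem.Str.strip resp), ("severity", "medium")]]
      else (pvSplitBlocks (ls.map PySem.Str.strip)).map pvBuild) := by
  have hkey : (pvFinish (ls.foldl (fun st line => pvAStep st (PySem.Str.strip line))
      ([], none))).map PySem.Dict.items = (pvSplitBlocks (ls.map PySem.Str.strip)).map pvBuild := by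
    rw [← List.foldl_map]
    simpa using pvRunNone (ls.map PySem.Str.strip) []
  have hemp : (pvFinish (ls.foldl (fun st line => pvAStep st (PySem.Str.strip line))
      ([], none))).isEmpty = ((pvSplitBlocks (ls.map PySem.Str.strip)).map pvBuild).isEmpty := by
    rw [← hkey, List.isEmpty_map]
  by_cases hc : (((pvSplitBlocks (ls.map PySem.Str.strip)).map pvBuild).isEmpty
      && !(PySem.Str.strip resp == "")) = true
  · rw [hemp, if_pos hc, if_pos hc, List.map_append, hkey]
    rw [Bool.and_eq_true, List.isEmpty_iff] at hc
    rw [hc.1]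
    rfl
  · rw [hemp, if_neg hc, if_neg hc, hkey]

-- ===== VERDICT (by name: the statement is the Claim_ definition above) =====
theorem extract_issues_from_response_py_spec : Claim_equal_extract_issues_from_response_py := by
  intro response invoice_data _
  exact pvFinal response ((PySem.Str.split? response "\n").getD [])
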